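-- pv_equiv track=rewrite | github.com/zxtwonder/python-rev | rev-distance-sensor/rev_distance_sensor/drivers/vl53l0x.py | _encode_timeout
-- ===== SOURCE A (Python) =====
-- def _encode_timeout(mclks: int) -> int:
--     if mclks > 0:
--         lsb = mclks - 1
--         msb = 0
--         while (lsb & 0xFFFFFF00) > 0:
--             lsb >>= 1
--             msb += 1
--         return (msb << 8) | (lsb & 0xFF)
--     return 0
-- ===== SOURCE B (Python) =====
-- def _encode_timeout(mclks: int) -> int:
--     if mclks <= 0:
--         return 0
--     lsb = mclks - 1
--     msb = max(lsb.bit_length() - 8, 0)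
--     return (msb << 8) | (lsb >> msb)
-- ===== Notes on version B (the rewrite author's own statement) =====
-- stated objective: idiomatic
-- what changed: Replaces the shift-and-count while loop with a closed-form bit_length computation of the exponent, then a single shift.
import Mathlib
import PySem

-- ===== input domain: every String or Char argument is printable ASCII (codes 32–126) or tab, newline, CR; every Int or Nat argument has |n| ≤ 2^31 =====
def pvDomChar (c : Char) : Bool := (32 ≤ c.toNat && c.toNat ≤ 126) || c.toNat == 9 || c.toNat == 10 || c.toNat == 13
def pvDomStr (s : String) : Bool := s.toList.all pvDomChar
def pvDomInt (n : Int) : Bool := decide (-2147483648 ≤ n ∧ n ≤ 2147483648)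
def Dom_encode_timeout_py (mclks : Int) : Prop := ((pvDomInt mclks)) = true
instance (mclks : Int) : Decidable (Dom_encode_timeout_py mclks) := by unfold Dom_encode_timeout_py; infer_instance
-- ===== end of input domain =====

-- B replaces A's shift-and-count while loop with a closed-form bit_length computation (idiomatic; no speed claim).

-- ===== PORT A =====
-- the while loop: shift lsb right and count until the high mask clears
def encTimeoutLoop (lsb msb : Nat) : Nat × Nat :=
  if (lsb &&& 0xFFFFFF00) > 0 then encTimeoutLoop (lsb >>> 1) (msb + 1) else (lsb, msb)
  termination_by lsb
  decreasing_by
    have h1 : 0 < lsb := lt_of_lt_of_le ‹(lsb &&& 0xFFFFFF00) > 0› (Nat.and_le_left)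
    simpa [Nat.shiftRight_one] using Nat.div_lt_self h1 (by norm_num)

def encode_timeout_py (mclks : Int) : Int :=
  if mclks > 0 then
    -- mclks > 0, so (mclks - 1).toNat is exact
    let p := encTimeoutLoop (mclks - 1).toNat 0
    (((p.2 <<< 8) ||| (p.1 &&& 0xFF) : Nat) : Int)
  else 0

-- ===== PORT B =====
def encode_timeout_py_alt (mclks : Int) : Int :=
  if mclks ≤ 0 then 0
  else
    let lsb := (mclks - 1).toNat
    -- Python: max(lsb.bit_length() - 8, 0); Nat.size is bit_length and Nat subtraction truncates at 0
    let msb := Nat.size lsb - 8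
    (((msb <<< 8) ||| (lsb >>> msb) : Nat) : Int)

-- ===== PRECONDITION & SPEC =====
def Spec_encode_timeout_py (mclks : Int) (out : Int) : Prop := out = encode_timeout_py_alt mclks
instance (mclks : Int) (out : Int) : Decidable (Spec_encode_timeout_py mclks out) := by unfold Spec_encode_timeout_py; infer_instance

-- ===== CLAIM (what is proved, stated in full; the proofs are below) =====
def Claim_equal_encode_timeout_py : Prop := ∀ (mclks : Int), Dom_encode_timeout_py mclks → Spec_encode_timeout_py mclks (encode_timeout_py mclks)

-- ===== LEMMAS AND PROOFS =====

-- for n < 2^32, the loop guard `n & 0xFFFFFF00 > 0` is exactly `256 <= n`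
theorem encMask_iff (n : Nat) (h : n < 2 ^ 32) : (0 < n &&& 0xFFFFFF00) ↔ 256 ≤ n := by
  constructor
  · intro hpos
    by_contra hlt
    push_neg at hlt
    have hz : n &&& 0xFFFFFF00 = 0 := by
      apply Nat.eq_of_testBit_eq
      intro i
      simp only [Nat.testBit_and, Nat.zero_testBit, Bool.and_eq_false_iff]
      by_cases hi : i < 8
      · right; interval_cases i <;> decide
      · left
        have h28 : (256 : Nat) ≤ 2 ^ i := by
          calc (256 : Nat) = 2 ^ 8 := by norm_num
            _ ≤ 2 ^ i := Nat.pow_le_pow_right (by norm_num) (by omega)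
        exact Nat.testBit_lt_two_pow (by omega)
    omega
  · intro h256
    obtain ⟨i, hbit, hmax⟩ := Nat.exists_most_significant_bit (n := n) (by omega)
    have hi8 : 8 ≤ i := by
      by_contra hlt
      push_neg at hlt
      have : n < 2 ^ 8 := Nat.lt_pow_two_of_testBit n (fun j hj => hmax j (by omega))
      omega
    have hi32 : i < 32 := by
      by_contra hge
      push_neg at hge
      have h2i : (2 : Nat) ^ 32 ≤ 2 ^ i := Nat.pow_le_pow_right (by norm_num) hge
      rw [Nat.testBit_lt_two_pow (by omega)] at hbit
      exact Bool.false_ne_true hbit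
    have hmask : Nat.testBit 0xFFFFFF00 i = true := by interval_cases i <;> decide
    have hset : (n &&& 0xFFFFFF00).testBit i = true := by simp [Nat.testBit_and, hbit, hmask]
    exact Nat.pos_of_ne_zero (fun h0 => by simp [h0] at hset)

theorem shiftRight_div2 (a k : Nat) : (a / 2) >>> k = a >>> (k + 1) := by
  simp [Nat.shiftRight_eq_div_pow, pow_succ, Nat.div_div_eq_div_mul, Nat.mul_comm]

theorem size_div_two (n : Nat) (h : n ≠ 0) : Nat.size n = Nat.size (n / 2) + 1 := by
  conv_lhs => rw [← Nat.bit_testBit_zero_shiftRight_one n]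
  rw [Nat.size_bit (by rw [Nat.bit_testBit_zero_shiftRight_one]; exact h)]
  simp [Nat.shiftRight_one]

-- the loop computes the closed form, for n < 2^32
theorem encTimeoutLoop_eq (n : Nat) (hn : n < 2 ^ 32) :
    ∀ msb, encTimeoutLoop n msb = (n >>> (Nat.size n - 8), msb + (Nat.size n - 8)) := by
  induction n using Nat.strong_induction_on with
  | _ n ih =>
    intro msb
    rw [encTimeoutLoop]
    by_cases h256 : 256 ≤ n
    · have hguard : 0 < n &&& 0xFFFFFF00 := (encMask_iff n hn).mpr h256
      have hhalf : n >>> 1 < n := by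
        simpa [Nat.shiftRight_one] using Nat.div_lt_self (by omega) (by norm_num)
      rw [if_pos hguard, ih (n >>> 1) hhalf (by omega) (msb + 1)]
      have hsz : Nat.size n = Nat.size (n / 2) + 1 := size_div_two n (by omega)
      have hsz9 : 9 ≤ Nat.size n := by
        rw [show (9 : Nat) = 8 + 1 by rfl, Nat.succ_le_iff, Nat.lt_size]
        exact h256
      have hk : Nat.size n - 8 = (Nat.size (n >>> 1) - 8) + 1 := by
        simp only [Nat.shiftRight_one]
        omega
      simp only [Prod.mk.injEq]
      refine ⟨?_, ?_⟩
      · rw [Nat.shiftRight_one, hsz,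
          show Nat.size (n / 2) + 1 - 8 = (Nat.size (n / 2) - 8) + 1 by omega,
          ← shiftRight_div2]
      · omega
    · have hguard : ¬ 0 < n &&& 0xFFFFFF00 := by rw [encMask_iff n hn]; omega
      have hsz : Nat.size n ≤ 8 := Nat.size_le.mpr (by omega)
      rw [if_neg hguard]
      simp [Nat.sub_eq_zero_of_le hsz]

-- the final lsb is below 256, so masking with 0xFF is the identity
theorem shifted_lt (n : Nat) : n >>> (Nat.size n - 8) < 256 := by
  rw [Nat.shiftRight_eq_div_pow]
  by_cases hsz : Nat.size n ≤ 8
  · have := Nat.lt_size_self n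
    have : n < 2 ^ 8 := lt_of_lt_of_le this (Nat.pow_le_pow_right (by norm_num) hsz)
    exact lt_of_le_of_lt (Nat.div_le_self _ _) this
  · push_neg at hsz
    have hlt := Nat.lt_size_self n
    have : n < 2 ^ (Nat.size n - 8) * 2 ^ 8 := by
      rw [← Nat.pow_add]
      have : Nat.size n - 8 + 8 = Nat.size n := by omega
      rw [this]; exact hlt
    have := Nat.div_lt_of_lt_mul (by omega : n < 2 ^ (Nat.size n - 8) * 2 ^ 8)
    simpa using this

-- ===== VERDICT (by name: the statement is the Claim_ definition above) =====
theorem encode_timeout_py_spec : Claim_equal_encode_timeout_py := by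
  intro mclks hdom
  unfold Spec_encode_timeout_py encode_timeout_py encode_timeout_py_alt
  by_cases hpos : mclks > 0
  · rw [if_pos hpos, if_neg (by omega)]
    simp only
    set n := (mclks - 1).toNat with hn
    have hn32 : n < 2 ^ 32 := by
      unfold Dom_encode_timeout_py pvDomInt at hdom
      simp only [decide_eq_true_eq] at hdom
      omega
    rw [encTimeoutLoop_eq n hn32 0]
    have hmask : (n >>> (Nat.size n - 8)) &&& 0xFF = n >>> (Nat.size n - 8) := by
      have h255 : (0xFF : Nat) = 2 ^ 8 - 1 := by norm_num
      rw [h255, Nat.and_two_pow_sub_one_eq_mod, Nat.mod_eq_of_lt (shifted_lt n)]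
    rw [hmask]
    simp
  · rw [if_neg hpos, if_pos (by omega)]
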